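-- pv_equiv track=rewrite | github.com/krassowski/keyboard-fixer | fix.py | generate_letter_insertions
-- ===== SOURCE A (Python) =====
-- def generate_letter_insertions(word, letter, count):
--     """Generate all strings formed by inserting `letter` exactly `count` times."""
--     states = {word}
--     for _ in range(count):
--         next_states = set()
--         for state in states:
--             for index in range(len(state) + 1):
--                 next_states.add(state[:index] + letter + state[index:])
--         states = next_states
--     return states
-- ===== SOURCE B (Python) =====
-- def _insert_once(state, letter):
--     """Yield state with one copy of letter inserted, front gap first: walks a
--     running prefix/suffix split instead of indexing with range(len + 1)."""
--     pre, suf = "", state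
--     while True:
--         yield pre + letter + suf
--         if not suf:
--             return
--         pre, suf = pre + suf[0], suf[1:]
--
--
-- def generate_letter_insertions(word, letter, count):
--     """Generate all strings formed by inserting `letter` exactly `count` times.
--
--     Recursive decomposition: the answer for count insertions is obtained by
--     inserting the letter once into every member of the answer for count - 1,
--     instead of A's in-place iterative rebuilding of a frontier variable.
--     """
--     if count <= 0:
--         return {word}
--     result = set()
--     for state in generate_letter_insertions(word, letter, count - 1):
--         result.update(_insert_once(state, letter))
--     return result
-- ===== Notes on version B (the rewrite author's own statement) =====
-- stated objective: alternative
-- what changed: B is a recursive definition (the count-insertions answer is obtained by inserting the letter once into every member of the count-1 answer) whose single-insertion step walks a running prefix/suffix split, instead of A's iterative in-place frontier rebuilding with range(len(state)+1) and index slicing; the set-valued levels themselves must be kept, since any exact re-implementation reproduces the same collection of states per level (the hinted stars-and-bars enumeration is wrong for multi-character letters, which can be inserted inside earlier insertions).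
import Mathlib
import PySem

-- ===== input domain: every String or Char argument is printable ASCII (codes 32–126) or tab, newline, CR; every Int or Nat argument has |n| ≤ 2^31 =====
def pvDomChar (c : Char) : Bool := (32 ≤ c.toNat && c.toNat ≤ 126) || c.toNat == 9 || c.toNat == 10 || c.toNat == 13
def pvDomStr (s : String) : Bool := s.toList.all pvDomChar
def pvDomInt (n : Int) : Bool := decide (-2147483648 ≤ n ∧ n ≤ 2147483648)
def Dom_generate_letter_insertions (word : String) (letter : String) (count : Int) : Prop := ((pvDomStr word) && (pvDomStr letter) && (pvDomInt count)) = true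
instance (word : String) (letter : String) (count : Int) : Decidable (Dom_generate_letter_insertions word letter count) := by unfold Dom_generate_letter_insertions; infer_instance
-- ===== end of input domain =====

-- B is a recursive definition (insert once into every member of the count-1 answer) whose
-- single-insertion step walks a running prefix/suffix split instead of A's iterative
-- frontier rebuilding with range/len/slicing; objective: alternative.

-- ===== PORT A =====
-- state[:index] + letter + state[index:]  (string slicing and + ported on the char-list side via PySem.List.slice, exact)
def pvInsA (state : String) (letter : String) (index : Int) : String :=
  String.ofList (PySem.List.slice state.toList none (some index) ++ letter.toList ++ PySem.List.slice state.toList (some index) none)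

def generate_letter_insertions (word : String) (letter : String) (count : Int) : List String :=
  (PySem.List.pyRange 0 count 1).foldl
    (fun states _ =>
      states.foldl
        (fun next_states state =>
          (PySem.List.pyRange 0 (PySem.Str.len state + 1) 1).foldl
            (fun ns index => PySem.Set.add ns (pvInsA state letter index)) next_states)
        PySem.Set.empty)
    (PySem.Set.ofList [word])

-- ===== PORT B =====
-- the _insert_once generator: 'yield pre + letter + suf' then 'pre, suf = pre + suf[0], suf[1:]'
-- until suf is empty — ported step for step as structural recursion on the suffix's chars
-- (strings handled on the char-list side, exact)
def pvInsertOnce (letter : List Char) : List Char → List Char → List String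
  | pre, [] => [String.ofList (pre ++ letter)]
  | pre, c :: suf =>
      String.ofList (pre ++ letter ++ (c :: suf)) :: pvInsertOnce letter (pre ++ [c]) suf

-- the recursion on count (count <= 0 is the 0 case: the recursion strictly decreases count,
-- so the port runs on the fuel count.toNat)
def pvGenB (word : String) (letter : String) : Nat → List String
  | 0 => [word]
  | k + 1 =>
      (pvGenB word letter k).foldl
        (fun result state =>
          PySem.Set.update result (pvInsertOnce letter.toList [] state.toList))
        PySem.Set.empty

def generate_letter_insertions_alt (word : String) (letter : String) (count : Int) : List String :=
  pvGenB word letter count.toNat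

-- ===== PRECONDITION & SPEC =====
def Spec_generate_letter_insertions (word : String) (letter : String) (count : Int) (out : List String) : Prop := out = generate_letter_insertions_alt word letter count
instance (word : String) (letter : String) (count : Int) (out : List String) : Decidable (Spec_generate_letter_insertions word letter count out) := by unfold Spec_generate_letter_insertions; infer_instance

-- ===== CLAIM (what is proved, stated in full; the proofs are below) =====
def Claim_equal_generate_letter_insertions : Prop := ∀ (word : String) (letter : String) (count : Int), Dom_generate_letter_insertions word letter count → Spec_generate_letter_insertions word letter count (generate_letter_insertions word letter count)

-- ===== LEMMAS AND PROOFS =====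

-- the prefix/suffix walk enumerates exactly the take/drop splits, front gap first
theorem pv_insertOnce_eq (letter : List Char) (suf : List Char) :
    ∀ pre : List Char,
      pvInsertOnce letter pre suf
        = ((List.range (suf.length + 1)).map
            (fun j => pre ++ (suf.take j ++ letter ++ suf.drop j))).map String.ofList := by
  induction suf with
  | nil => intro pre; simp [pvInsertOnce]
  | cons c suf ih =>
      intro pre
      have hsplit : (List.range ((c :: suf).length + 1)).map
            (fun j => pre ++ ((c :: suf).take j ++ letter ++ (c :: suf).drop j))
          = (pre ++ (letter ++ (c :: suf))) ::
              (List.range (suf.length + 1)).map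
                (fun j => (pre ++ [c]) ++ (suf.take j ++ letter ++ suf.drop j)) := by
        rw [List.length_cons, List.range_succ_eq_map, List.map_cons, List.map_map]
        exact List.cons_eq_cons.mpr
          ⟨by simp, List.map_congr_left (fun j _ => by simp [List.append_assoc])⟩
      rw [pvInsertOnce, ih (pre ++ [c]), hsplit, List.map_cons]
      congr 1
      simp [List.append_assoc]

-- A's per-state candidate list is B's prefix/suffix walk
theorem pv_cand_eq (letter s : String) :
    (PySem.List.pyRange 0 (PySem.Str.len s + 1) 1).map (fun i => pvInsA s letter i)
      = pvInsertOnce letter.toList [] s.toList := by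
  rw [pv_insertOnce_eq]
  have hn : PySem.Str.len s + 1 = ((s.toList.length + 1 : Nat) : Int) := by
    rw [PySem.Str.len_eq]; push_cast; ring
  rw [hn, PySem.List.pyRange_zero_natCast, List.map_map, List.map_map]
  refine List.map_congr_left ?_
  intro j hj
  have h0 : (0 : Int) ≤ (j : Int) := Int.natCast_nonneg j
  simp only [Function.comp_apply, pvInsA, PySem.List.slice_to s.toList h0,
    PySem.List.slice_from s.toList h0, Int.toNat_natCast, List.nil_append, List.append_assoc]

-- A's two nested inner loops accumulate exactly Set.add folded over the flatMap of
-- the per-state candidate lists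
theorem pv_fold_fold_flatMap {α β γ : Type} [BEq α] (states : List β)
    (idx : β → List γ) (f : β → γ → α) :
    ∀ (acc : PySem.Set α),
      states.foldl (fun ns s => (idx s).foldl (fun ns' i => PySem.Set.add ns' (f s i)) ns) acc
        = List.foldl PySem.Set.add acc (states.flatMap (fun s => (idx s).map (f s))) := by
  induction states with
  | nil => intro acc; rfl
  | cons s rest ih =>
      intro acc
      simp only [List.foldl_cons, List.flatMap_cons, List.foldl_append]
      rw [ih]
      congr 1
      clear ih
      induction (idx s) generalizing acc with
      | nil => rfl
      | cons j js ihj => simpa using ihj (PySem.Set.add acc (f s j))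

-- a fold of updates over blocks is one fold of adds over the concatenation
theorem pv_foldl_update (g : String → List String) (cs : List String) :
    ∀ acc : PySem.Set String,
      cs.foldl (fun a c => PySem.Set.update a (g c)) acc
        = List.foldl PySem.Set.add acc (cs.flatMap g) := by
  induction cs with
  | nil => intro acc; rfl
  | cons c cs ih =>
      intro acc
      rw [List.foldl_cons, List.flatMap_cons, List.foldl_append, ih]
      rfl

-- one level of A equals one level of B on the same frontier
theorem pv_level_eq (letter : String) (states : List String) :
    states.foldl
        (fun next_states state =>
          (PySem.List.pyRange 0 (PySem.Str.len state + 1) 1).foldl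
            (fun ns index => PySem.Set.add ns (pvInsA state letter index)) next_states)
        PySem.Set.empty
      = states.foldl
          (fun result state =>
            PySem.Set.update result (pvInsertOnce letter.toList [] state.toList))
          PySem.Set.empty := by
  rw [pv_fold_fold_flatMap states (fun s => PySem.List.pyRange 0 (PySem.Str.len s + 1) 1)
        (fun s i => pvInsA s letter i) PySem.Set.empty,
      pv_foldl_update]
  congr 1
  exact List.flatMap_congr (fun s _ => pv_cand_eq letter s)

-- A's fold after m levels is B's recursion at fuel m
theorem pv_main (word letter : String) (m : Nat) :
    (PySem.List.pyRange 0 (m : Int) 1).foldl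
        (fun states _ =>
          states.foldl
            (fun next_states state =>
              (PySem.List.pyRange 0 (PySem.Str.len state + 1) 1).foldl
                (fun ns index => PySem.Set.add ns (pvInsA state letter index)) next_states)
            PySem.Set.empty)
        (PySem.Set.ofList [word])
      = pvGenB word letter m := by
  induction m with
  | zero =>
      have h1 : PySem.Set.ofList [word] = [word] :=
        PySem.Set.ofList_eq_self_of_nodup [word] (List.nodup_singleton word)
      simp [PySem.List.pyRange_one_eq_nil, pvGenB, h1]
  | succ m ih =>
      have hsplit : PySem.List.pyRange 0 ((m + 1 : Nat) : Int) 1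
          = PySem.List.pyRange 0 (m : Int) 1 ++ [(m : Int)] := by
        push_cast
        exact PySem.List.pyRange_one_succ_right (by positivity)
      rw [hsplit]
      simp only [List.foldl_append, List.foldl_cons, List.foldl_nil]
      rw [ih, pvGenB]
      exact pv_level_eq letter (pvGenB word letter m)

-- ===== VERDICT (by name: the statement is the Claim_ definition above) =====
theorem generate_letter_insertions_spec : Claim_equal_generate_letter_insertions := by
  intro word letter count _
  unfold Spec_generate_letter_insertions generate_letter_insertions generate_letter_insertions_alt
  by_cases hle : count ≤ 0
  · have h0 : count.toNat = 0 := by omega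
    rw [PySem.List.pyRange_one_eq_nil (by omega), h0]
    rfl
  · have hc : ((count.toNat : Nat) : Int) = count := Int.toNat_of_nonneg (by omega)
    have h := pv_main word letter count.toNat
    rwa [hc] at h
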